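-- pv_equiv track=rewrite | github.com/aiyan1234/Daily-Programming | exponent.py | check
-- ===== SOURCE A (Python) =====
-- def expo(n):
--     c=0
--     while n%2==0 and n!=0:
--         c+=1
--         n//=2
--     return c
--
-- def check(a,b):
--     maxnum=float('-inf')
--     num=a
--     for i in range(a,b+1):
--         temp=expo(i)
--         if temp>maxnum:
--             maxnum=temp
--             num=i
--     return num
-- ===== SOURCE B (Python) =====
-- def check(a, b):
--     # Walk powers of two upward: for each k with a nonzero multiple of 2**k
--     # in [a, b], the smallest such multiple is the first element of maximal
--     # 2-adic valuation seen so far; stop at the first k with none.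
--     ans = a
--     limit = max(abs(a), abs(b))
--     k = 1
--     while 2 ** k <= limit:
--         p = 2 ** k
--         m = a + (-a) % p          # smallest multiple of p that is >= a
--         if m == 0:
--             m = p                 # smallest nonzero multiple that is >= a
--         if m > b:
--             break
--         ans = m
--         k += 1
--     return ans
-- ===== Notes on version B (the rewrite author's own statement) =====
-- stated objective: alternative
-- what changed: B replaces A's per-element scan of [a,b] (computing the 2-adic valuation of every integer in the range) with a doubling loop over powers of two that computes the smallest nonzero multiple of 2^k in the range by modular arithmetic, stopping at the first k with none; intended as faster on wide ranges (a timing run measured 207x at the largest size but not consistently across input shapes), so claimed only as an alternative algorithm.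
import Mathlib
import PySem

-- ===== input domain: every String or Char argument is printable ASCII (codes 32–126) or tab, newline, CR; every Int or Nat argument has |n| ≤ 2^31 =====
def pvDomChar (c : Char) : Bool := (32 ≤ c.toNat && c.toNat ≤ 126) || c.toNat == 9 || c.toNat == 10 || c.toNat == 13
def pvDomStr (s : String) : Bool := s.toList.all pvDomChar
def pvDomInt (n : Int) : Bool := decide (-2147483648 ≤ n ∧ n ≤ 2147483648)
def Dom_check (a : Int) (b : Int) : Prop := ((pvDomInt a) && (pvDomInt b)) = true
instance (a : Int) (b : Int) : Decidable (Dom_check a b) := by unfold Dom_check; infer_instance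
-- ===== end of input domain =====

-- B replaces A's element-by-element scan of [a,b] with a doubling loop over powers of
-- two (smallest nonzero multiple of 2^k in range): a different algorithm whose loop count
-- is logarithmic in max(|a|,|b|) rather than linear in b-a.

-- ===== PORT A =====
-- expo's while loop: c accumulates, n is halved while even and nonzero
def expoGo (n c : Int) : Int :=
  if h : PySem.Int.mod n 2 = 0 ∧ n ≠ 0 then expoGo (PySem.Int.floordiv n 2) (c + 1) else c
termination_by n.natAbs
decreasing_by
  obtain ⟨m, hm⟩ := (PySem.Int.mod_eq_zero_iff_dvd n 2).mp h.1
  have h2 : PySem.Int.floordiv n 2 = n / 2 := PySem.Int.floordiv_eq_ediv_of_pos (by norm_num)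
  subst hm
  rw [h2, Int.mul_ediv_cancel_left _ (by norm_num)]
  have hm0 : m ≠ 0 := by intro h0; exact h.2 (by simp [h0])
  simp [Int.natAbs_mul]
  omega

def expo (n : Int) : Int := expoGo n 0

-- one loop step of check: state is (maxnum, num); maxnum = none plays float('-inf')
def stepA (st : Option Int × Int) (i : Int) : Option Int × Int :=
  let temp := expo i
  if (match st.1 with | none => true | some m => decide (m < temp)) = true
  then (temp, i) else st

def check (a : Int) (b : Int) : Int :=
  ((PySem.List.pyRange a (b + 1) 1).foldl stepA (none, a)).2

-- ===== PORT B =====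
-- B's while loop: k walks 1,2,…; ans is the smallest nonzero multiple of 2^(k-1) in [a,b]
def altGo (a b limit ans : Int) (k : Nat) : Int :=
  if (2 : Int) ^ k ≤ limit then
    let p : Int := 2 ^ k
    let m0 := a + PySem.Int.mod (-a) p
    let m := if m0 = 0 then p else m0
    if m > b then ans else altGo a b limit m (k + 1)
  else ans
termination_by (limit + 1 - 2 ^ k).toNat
decreasing_by
  have h1 : (1 : Int) ≤ 2 ^ k := one_le_pow₀ (by norm_num)
  omega

def check_alt (a : Int) (b : Int) : Int :=
  altGo a b (max |a| |b|) a 1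

-- ===== PRECONDITION & SPEC =====
def Spec_check (a : Int) (b : Int) (out : Int) : Prop := out = check_alt a b
instance (a : Int) (b : Int) (out : Int) : Decidable (Spec_check a b out) := by unfold Spec_check; infer_instance

-- ===== CLAIM (what is proved, stated in full; the proofs are below) =====
def Claim_equal_check : Prop := ∀ (a : Int) (b : Int), Dom_check a b → Spec_check a b (check a b)

-- ===== LEMMAS AND PROOFS =====

theorem expoGo_acc (n c : Int) : expoGo n c = c + expoGo n 0 := by
  induction hn : n.natAbs using Nat.strong_induction_on generalizing n c with
  | _ d ih =>
    subst hn
    by_cases h : PySem.Int.mod n 2 = 0 ∧ n ≠ 0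
    · conv_lhs => rw [expoGo]
      conv_rhs => rw [expoGo]
      rw [dif_pos h, dif_pos h]
      have hlt : (PySem.Int.floordiv n 2).natAbs < n.natAbs := by
        obtain ⟨m, hm⟩ := (PySem.Int.mod_eq_zero_iff_dvd n 2).mp h.1
        have h2 : PySem.Int.floordiv n 2 = n / 2 := PySem.Int.floordiv_eq_ediv_of_pos (by norm_num)
        subst hm
        rw [h2, Int.mul_ediv_cancel_left _ (by norm_num)]
        have hm0 : m ≠ 0 := by intro h0; exact h.2 (by simp [h0])
        simp [Int.natAbs_mul]; omega
      rw [ih _ hlt _ (c + 1) rfl, ih _ hlt _ (0 + 1) rfl]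
      ring
    · conv_lhs => rw [expoGo]
      conv_rhs => rw [expoGo]
      rw [dif_neg h, dif_neg h]; ring

theorem expo_zero : expo 0 = 0 := by
  rw [expo, expoGo]; simp

theorem expo_nonneg (n : Int) : 0 ≤ expo n := by
  induction hn : n.natAbs using Nat.strong_induction_on generalizing n with
  | _ d ih =>
    subst hn
    by_cases h : PySem.Int.mod n 2 = 0 ∧ n ≠ 0
    · rw [expo, expoGo, dif_pos h, expoGo_acc]
      have hlt : (PySem.Int.floordiv n 2).natAbs < n.natAbs := by
        obtain ⟨m, hm⟩ := (PySem.Int.mod_eq_zero_iff_dvd n 2).mp h.1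
        have h2 : PySem.Int.floordiv n 2 = n / 2 := PySem.Int.floordiv_eq_ediv_of_pos (by norm_num)
        subst hm
        rw [h2, Int.mul_ediv_cancel_left _ (by norm_num)]
        have hm0 : m ≠ 0 := by intro h0; exact h.2 (by simp [h0])
        simp [Int.natAbs_mul]; omega
      have := ih _ hlt _ rfl
      rw [expo] at this; omega
    · rw [expo, expoGo, dif_neg h]

theorem expo_of_odd {n : Int} (h : ¬ (2 ∣ n)) : expo n = 0 := by
  rw [expo, expoGo]
  rw [dif_neg]
  intro hc
  exact h ((PySem.Int.mod_eq_zero_iff_dvd n 2).mp hc.1)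

theorem expo_two_mul {m : Int} (hm : m ≠ 0) : expo (2 * m) = expo m + 1 := by
  have hd : PySem.Int.mod (2 * m) 2 = 0 := (PySem.Int.mod_eq_zero_iff_dvd _ 2).mpr ⟨m, rfl⟩
  have hne : (2 : Int) * m ≠ 0 := by intro h0; exact hm (by omega)
  rw [expo, expoGo, dif_pos ⟨hd, hne⟩, expoGo_acc]
  have h2 : PySem.Int.floordiv (2 * m) 2 = (2 * m) / 2 := PySem.Int.floordiv_eq_ediv_of_pos (by norm_num)
  rw [h2, Int.mul_ediv_cancel_left _ (by norm_num), expo]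
  ring

-- 2-adic characterisation of expo on nonzero integers
theorem dvd_iff_le_expo : ∀ (n : Int), n ≠ 0 → ∀ (k : Nat),
    ((2 : Int) ^ k ∣ n ↔ (k : Int) ≤ expo n) := by
  intro n
  induction hna : n.natAbs using Nat.strong_induction_on generalizing n with
  | _ d ih =>
    subst hna
    intro hn k
    by_cases h2 : (2 : Int) ∣ n
    · obtain ⟨m, rfl⟩ := h2
      have hm : m ≠ 0 := by intro h0; exact hn (by simp [h0])
      have hlt : m.natAbs < (2 * m).natAbs := by simp [Int.natAbs_mul]; omega
      rw [expo_two_mul hm]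
      cases k with
      | zero => simpa using le_trans (expo_nonneg m) (by omega)
      | succ j =>
        have ihj := ih m.natAbs hlt m rfl hm j
        constructor
        · intro hd
          have : (2 : Int) ^ j ∣ m := by
            rcases hd with ⟨t, ht⟩
            refine ⟨t, mul_left_cancel₀ (by norm_num : (2:Int) ≠ 0) ?_⟩
            rw [ht, pow_succ]; ring
          have := ihj.mp this
          push_cast; omega
        · intro hle
          have : (j : Int) ≤ expo m := by push_cast at hle; omega
          obtain ⟨t, ht⟩ := ihj.mpr this
          exact ⟨t, by rw [pow_succ]; rw [ht]; ring⟩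
    · rw [expo_of_odd h2]
      constructor
      · intro hd
        cases k with
        | zero => simp
        | succ j =>
          exact absurd (dvd_trans (by exact ⟨2 ^ j, by ring⟩) hd) h2
      · intro hle
        have : k = 0 := by omega
        simp [this]

-- nonzero elements of the range have expo ≥ 1 ↔ they are even, etc.; first-argmax
-- characterisation of A's fold
theorem foldA_char (a c : Int) (h : a ≤ c) :
    ∃ M num, (PySem.List.pyRange a (c + 1) 1).foldl stepA (none, a) = (some M, num) ∧
      a ≤ num ∧ num ≤ c ∧ expo num = M ∧
      (∀ i, a ≤ i → i ≤ c → expo i ≤ M) ∧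
      (∀ i, a ≤ i → i < num → expo i < M) := by
  induction c, h using Int.le_induction with
  | base =>
    refine ⟨expo a, a, ?_, le_refl a, le_refl a, rfl, ?_, ?_⟩
    · rw [PySem.List.pyRange_one_singleton]
      simp [stepA]
    · intro i h1 h2
      have : i = a := le_antisymm h2 h1
      rw [this]
    · intro i h1 h2; omega
  | succ c hc IH =>
    obtain ⟨M, num, heq, h1, h2, h3, h4, h5⟩ := IH
    rw [PySem.List.pyRange_one_succ_right (by omega : a ≤ c + 1), List.foldl_append, heq]
    by_cases hlt : M < expo (c + 1)
    · refine ⟨expo (c + 1), c + 1, ?_, by omega, le_refl _, rfl, ?_, ?_⟩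
      · simp [stepA, hlt]
      · intro i hi1 hi2
        rcases lt_or_ge i (c + 1) with hcase | hcase
        · exact le_of_lt (lt_of_le_of_lt (h4 i hi1 (by omega)) hlt)
        · have : i = c + 1 := by omega
          rw [this]
      · intro i hi1 hi2
        exact lt_of_le_of_lt (h4 i hi1 (by omega)) hlt
    · refine ⟨M, num, ?_, h1, by omega, h3, ?_, h5⟩
      · simp [stepA, hlt]
      · intro i hi1 hi2
        rcases lt_or_ge i (c + 1) with hcase | hcase
        · exact h4 i hi1 (by omega)
        · have : i = c + 1 := by omega
          rw [this]; omega

-- the smallest nonzero multiple of p (0 < p) that is ≥ a, as computed by B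
theorem smallestMult_spec (a p : Int) (hp : 0 < p) :
    let m0 := a + PySem.Int.mod (-a) p
    let m := if m0 = 0 then p else m0
    p ∣ m ∧ m ≠ 0 ∧ a ≤ m ∧ (∀ m', p ∣ m' → m' ≠ 0 → a ≤ m' → m ≤ m') := by
  intro m0 m
  have hmod : PySem.Int.mod (-a) p = (-a) % p := PySem.Int.mod_eq_emod_of_pos hp
  have hnn : 0 ≤ (-a) % p := Int.emod_nonneg _ (by omega)
  have hub : (-a) % p < p := Int.emod_lt_of_pos _ hp
  have hdvd0 : p ∣ m0 := by
    refine ⟨-((-a) / p), ?_⟩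
    have := Int.emod_def (-a) p
    show a + PySem.Int.mod (-a) p = _
    rw [hmod, this]; ring
  have hge0 : a ≤ m0 := by show a ≤ a + PySem.Int.mod (-a) p; rw [hmod]; omega
  have hlt0 : m0 < a + p := by show a + PySem.Int.mod (-a) p < a + p; rw [hmod]; omega
  have hmin0 : ∀ m', p ∣ m' → a ≤ m' → m0 ≤ m' := by
    intro m' hd' ha'
    by_contra hcon
    push Not at hcon
    have hdd : p ∣ m0 - m' := dvd_sub hdvd0 hd'
    have := Int.le_of_dvd (by omega) hdd
    omega
  by_cases h0 : m0 = 0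
  · have hm : m = p := if_pos h0
    refine ⟨by rw [hm], by rw [hm]; omega, by rw [hm]; omega, ?_⟩
    intro m' hd' hne' ha'
    have hge : 0 ≤ m' := by have := hmin0 m' hd' ha'; omega
    have : p ≤ m' := Int.le_of_dvd (by omega) hd'
    omega
  · have hm : m = m0 := if_neg h0
    exact ⟨by rw [hm]; exact hdvd0, by rw [hm]; exact h0, by rw [hm]; exact hge0,
      fun m' hd' _ ha' => by rw [hm]; exact hmin0 m' hd' ha'⟩

-- B's loop returns the first argmax, given A's fold characterisation
theorem altGo_eq (a b M num : Int) (_hab : a ≤ b)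
    (hnum1 : a ≤ num) (hnum2 : num ≤ b) (hnumv : expo num = M)
    (hmax : ∀ i, a ≤ i → i ≤ b → expo i ≤ M)
    (hfirst : ∀ i, a ≤ i → i < num → expo i < M) :
    ∀ k : Nat, ∀ ans : Int, 1 ≤ k → ((k : Int) - 1 ≤ M) →
      ((k = 1 → ans = a) ∧
       (2 ≤ k → ((2 : Int) ^ (k - 1) ∣ ans ∧ ans ≠ 0 ∧ a ≤ ans ∧ ans ≤ b ∧
                 ∀ m, (2 : Int) ^ (k - 1) ∣ m → m ≠ 0 → a ≤ m → ans ≤ m))) →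
      altGo a b (max |a| |b|) ans k = num := by
  intro k
  induction hd : (M + 1 - (k : Int)).toNat using Nat.strong_induction_on generalizing k with
  | _ d ih =>
  intro ans hk1 hkM hans
  have hp : (0 : Int) < 2 ^ k := pow_pos (by norm_num) k
  rcases le_or_gt (k : Int) M with hkle | hkgt
  · -- loop continues: k ≤ M
    have hnumne : num ≠ 0 := by
      intro h0; rw [h0, expo_zero] at hnumv; omega
    have hdnum : (2 : Int) ^ k ∣ num := (dvd_iff_le_expo num hnumne k).mpr (by omega)
    have habs : (2 : Int) ^ k ≤ |num| := Int.le_of_dvd (abs_pos.mpr hnumne) ((dvd_abs _ _).mpr hdnum)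
    have hlim : (2 : Int) ^ k ≤ max |a| |b| := by
      rcases le_or_gt 0 num with hpos | hneg
      · have : |num| ≤ |b| := by rw [abs_of_nonneg hpos]; exact le_trans hnum2 (le_abs_self b)
        exact le_trans habs (le_trans this (le_max_right _ _))
      · have : |num| ≤ |a| := by rw [abs_of_neg hneg]; have := neg_abs_le a; omega
        exact le_trans habs (le_trans this (le_max_left _ _))
    rw [altGo, if_pos hlim]
    simp only []
    obtain ⟨hmdvd, hmne, hmge, hmmin⟩ := smallestMult_spec a (2 ^ k) hp
    have hmleq : (if a + PySem.Int.mod (-a) (2 ^ k) = 0 then (2:Int) ^ k else a + PySem.Int.mod (-a) (2 ^ k)) ≤ num :=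
      hmmin num hdnum hnumne hnum1
    rw [if_neg (by omega)]
    refine ih (M + 1 - ((k : Nat) + 1 : Nat)).toNat (by push_cast; omega) (k + 1) rfl _
      (by omega) (by push_cast; omega) ⟨by omega, fun _ => ?_⟩
    have hk1sub : k + 1 - 1 = k := by omega
    rw [hk1sub]
    refine ⟨hmdvd, hmne, hmge, by omega, hmmin⟩
  · -- loop exits: k = M + 1
    have hkM' : (k : Int) = M + 1 := by omega
    have hansnum : ans = num := by
      rcases Nat.lt_or_ge k 2 with hk2 | hk2
      · -- k = 1, M = 0
        have hk : k = 1 := by omega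
        have hM0 : M = 0 := by rw [hk] at hkM'; omega
        have hae : ans = a := hans.1 hk
        rw [hae]
        by_contra hne
        have : a < num := lt_of_le_of_ne hnum1 hne
        have := hfirst a (le_refl a) this
        have := expo_nonneg a
        omega
      · obtain ⟨hd1, hd2, hd3, hd4, hd5⟩ := hans.2 hk2
        have hM1 : (1 : Int) ≤ M := by omega
        have hcast : ((k - 1 : Nat) : Int) = M := by push_cast [Nat.cast_sub (by omega : 1 ≤ k)]; omega
        have hea : expo ans = M := by
          have hge : M ≤ expo ans := by
            have := (dvd_iff_le_expo ans hd2 (k - 1)).mp hd1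
            omega
          have hle := hmax ans hd3 hd4
          omega
        have hnle : num ≤ ans := by
          by_contra hcon
          push Not at hcon
          have := hfirst ans hd3 hcon
          omega
        have hnumne : num ≠ 0 := by
          intro h0; rw [h0, expo_zero] at hnumv; omega
        have hdnum : (2 : Int) ^ (k - 1) ∣ num := by
          refine (dvd_iff_le_expo num hnumne (k - 1)).mpr (by omega)
        have := hd5 num hdnum hnumne hnum1
        omega
    rcases le_or_gt ((2 : Int) ^ k) (max |a| |b|) with hlim | hlim
    · rw [altGo, if_pos hlim]
      simp only []
      obtain ⟨hmdvd, hmne, hmge, _⟩ := smallestMult_spec a (2 ^ k) hp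
      have hmb : (if a + PySem.Int.mod (-a) (2 ^ k) = 0 then (2:Int) ^ k else a + PySem.Int.mod (-a) (2 ^ k)) > b := by
        by_contra hcon
        push Not at hcon
        have hin := hmax _ hmge hcon
        have := (dvd_iff_le_expo _ hmne k).mp hmdvd
        omega
      rw [if_pos hmb]
      exact hansnum
    · rw [altGo, if_neg (by omega)]
      exact hansnum

-- ===== VERDICT (by name: the statement is the Claim_ definition above) =====
theorem check_spec : Claim_equal_check := by
  unfold Claim_equal_check Spec_check
  intro a b _
  rcases le_or_gt a b with hab | hab
  · obtain ⟨M, num, heq, h1, h2, h3, h4, h5⟩ := foldA_char a b hab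
    have hA : check a b = num := by rw [check, heq]
    have hB : check_alt a b = num := by
      rw [check_alt]
      refine altGo_eq a b M num hab h1 h2 h3 h4 h5 1 a (le_refl 1) ?_ ⟨fun _ => rfl, by omega⟩
      have := expo_nonneg num
      omega
    rw [hA, hB]
  · have hA : check a b = a := by
      rw [check, PySem.List.pyRange_one_eq_nil (by omega : b + 1 ≤ a)]
      rfl
    have hB : check_alt a b = a := by
      rw [check_alt, altGo]
      rcases le_or_gt ((2 : Int) ^ 1) (max |a| |b|) with hlim | hlim
      · rw [if_pos hlim]
        simp only []
        obtain ⟨_, _, hmge, _⟩ := smallestMult_spec a (2 ^ 1) (by norm_num)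
        rw [if_pos (by omega)]
      · rw [if_neg (by omega)]
    rw [hA, hB]
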